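-- pv_equiv track=rewrite | github.com/robertoraimondo/budget | bank_lookup.py | get_bank_suggestions
-- ===== SOURCE A (Python) =====
-- BANK_ROUTING_DATABASE = {
--     # Major Banks
--     "021000021": "Chase Bank",
--     "021000322": "Chase Bank",
--     "022000020": "Chase Bank",
--     "125000024": "Wells Fargo Bank",
--     "121000248": "Wells Fargo Bank",
--     "111000025": "Bank of America",
--     "026009593": "Bank of America",
--     "121042882": "Wells Fargo Bank",
--     "053000196": "Bank of America",
--     "054001204": "Bank of America",
--     "063100277": "JPMorgan Chase Bank",
--     "267084131": "JPMorgan Chase Bank",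
--     "021200025": "JPMorgan Chase Bank",
--
--     # Regional Banks
--     "122105278": "Wells Fargo Bank",
--     "114000093": "PNC Bank",
--     "043000096": "PNC Bank",
--     "054000030": "Citizens Bank",
--     "211274450": "TD Bank",
--     "031201360": "TD Bank",
--     "031100209": "TD Bank",
--     "101000019": "Bank of the West",
--     "321270742": "Huntington National Bank",
--     "044000024": "Huntington National Bank",
--
--     # Credit Unions and Others
--     "307070115": "Navy Federal Credit Union",
--     "256074974": "Navy Federal Credit Union",
--     "211391825": "USAA Federal Savings Bank",
--     "314074269": "Pentagon Federal Credit Union",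
--     "253177832": "Pentagon Federal Credit Union",
--     "263179817": "Publix Employees Federal Credit Union (PEFCU)",
--     "322271627": "Regions Bank",
--     "062000019": "Regions Bank",
--     "065400137": "KeyBank",
--     "041001039": "KeyBank",
--
--     # Online Banks
--     "031176110": "Ally Bank",
--     "124303120": "Capital One Bank",
--     "051405515": "Capital One Bank",
--     "103100195": "ING Direct (Capital One 360)",
--     "031100649": "Discover Bank",
--     "011103093": "American Express Bank",
-- }
--
-- def get_bank_suggestions(partial_routing):
--     """
--     Get bank suggestions based on partial routing number input
--     """
--     if not partial_routing or len(partial_routing) < 3: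
--         return []
--
--     suggestions = []
--     for routing, bank in BANK_ROUTING_DATABASE.items():
--         if routing.startswith(partial_routing):
--             suggestions.append({
--                 "routing_number": routing,
--                 "bank_name": bank,
--                 "formatted_routing": f"{routing[:3]}-{routing[3:6]}-{routing[6:]}"
--             })
--
--     # Sort by bank name and limit results
--     suggestions.sort(key=lambda x: x["bank_name"])
--     return suggestions[:10]  # Limit to 10 suggestions
-- ===== SOURCE B (Python) =====
-- # Re-implementation: the database is stored as an index grouped by bank name,
-- # with bank names in sorted order and each bank's routing numbers in the
-- # original database insertion order (= stable-sort tie order).  A call walks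
-- # the index in order and stops as soon as 10 suggestions are collected, so no
-- # per-call sort is needed.
-- ROUTINGS_BY_BANK = [
--     ("Ally Bank", ["031176110"]),
--     ("American Express Bank", ["011103093"]),
--     ("Bank of America", ["111000025", "026009593", "053000196", "054001204"]),
--     ("Bank of the West", ["101000019"]),
--     ("Capital One Bank", ["124303120", "051405515"]),
--     ("Chase Bank", ["021000021", "021000322", "022000020"]),
--     ("Citizens Bank", ["054000030"]),
--     ("Discover Bank", ["031100649"]),
--     ("Huntington National Bank", ["321270742", "044000024"]),
--     ("ING Direct (Capital One 360)", ["103100195"]),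
--     ("JPMorgan Chase Bank", ["063100277", "267084131", "021200025"]),
--     ("KeyBank", ["065400137", "041001039"]),
--     ("Navy Federal Credit Union", ["307070115", "256074974"]),
--     ("PNC Bank", ["114000093", "043000096"]),
--     ("Pentagon Federal Credit Union", ["314074269", "253177832"]),
--     ("Publix Employees Federal Credit Union (PEFCU)", ["263179817"]),
--     ("Regions Bank", ["322271627", "062000019"]),
--     ("TD Bank", ["211274450", "031201360", "031100209"]),
--     ("USAA Federal Savings Bank", ["211391825"]),
--     ("Wells Fargo Bank", ["125000024", "121000248", "121042882", "122105278"]),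
-- ]
--
--
-- def _suggestion(routing, bank):
--     return {
--         "routing_number": routing,
--         "bank_name": bank,
--         "formatted_routing": routing[:3] + "-" + routing[3:6] + "-" + routing[6:],
--     }
--
--
-- def get_bank_suggestions(partial_routing):
--     if len(partial_routing) < 3:
--         return []
--     out = []
--     for bank, routings in ROUTINGS_BY_BANK:
--         for routing in routings:
--             if routing.startswith(partial_routing):
--                 out.append(_suggestion(routing, bank))
--                 if len(out) == 10:
--                     return out
--     return out
-- ===== Notes on version B (the rewrite author's own statement) =====
-- stated objective: alternative
-- what changed: B stores the database as an index grouped by bank name (names pre-sorted, routings in insertion order) and collects at most 10 matches in one early-exit traversal, instead of A's scan-all + stable sort + slice per call.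
import Mathlib
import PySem

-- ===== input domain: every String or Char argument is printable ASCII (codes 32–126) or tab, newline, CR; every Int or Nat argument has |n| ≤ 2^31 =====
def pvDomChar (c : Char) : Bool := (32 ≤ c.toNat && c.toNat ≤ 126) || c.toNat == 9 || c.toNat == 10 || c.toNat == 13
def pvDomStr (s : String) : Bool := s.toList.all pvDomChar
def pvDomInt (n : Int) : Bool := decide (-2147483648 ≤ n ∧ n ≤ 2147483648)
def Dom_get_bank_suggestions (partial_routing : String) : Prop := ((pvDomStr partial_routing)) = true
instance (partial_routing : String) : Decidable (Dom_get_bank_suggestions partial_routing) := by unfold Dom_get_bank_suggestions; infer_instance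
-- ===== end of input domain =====

-- B stores the database as an index grouped by bank name (names pre-sorted, routings in
-- insertion order) and collects at most 10 matches in one early-exit traversal, instead of
-- A's scan-all + per-call stable sort + slice.

-- ===== PORT A =====

-- BANK_ROUTING_DATABASE: Python dict literal with pairwise-distinct keys → assoc list in insertion order
def pvDB : List (String × String) :=
  [("021000021", "Chase Bank"), ("021000322", "Chase Bank"), ("022000020", "Chase Bank"),
   ("125000024", "Wells Fargo Bank"), ("121000248", "Wells Fargo Bank"),
   ("111000025", "Bank of America"), ("026009593", "Bank of America"),
   ("121042882", "Wells Fargo Bank"), ("053000196", "Bank of America"),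
   ("054001204", "Bank of America"), ("063100277", "JPMorgan Chase Bank"),
   ("267084131", "JPMorgan Chase Bank"), ("021200025", "JPMorgan Chase Bank"),
   ("122105278", "Wells Fargo Bank"), ("114000093", "PNC Bank"), ("043000096", "PNC Bank"),
   ("054000030", "Citizens Bank"), ("211274450", "TD Bank"), ("031201360", "TD Bank"),
   ("031100209", "TD Bank"), ("101000019", "Bank of the West"),
   ("321270742", "Huntington National Bank"), ("044000024", "Huntington National Bank"),
   ("307070115", "Navy Federal Credit Union"), ("256074974", "Navy Federal Credit Union"),
   ("211391825", "USAA Federal Savings Bank"), ("314074269", "Pentagon Federal Credit Union"),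
   ("253177832", "Pentagon Federal Credit Union"),
   ("263179817", "Publix Employees Federal Credit Union (PEFCU)"),
   ("322271627", "Regions Bank"), ("062000019", "Regions Bank"), ("065400137", "KeyBank"),
   ("041001039", "KeyBank"), ("031176110", "Ally Bank"), ("124303120", "Capital One Bank"),
   ("051405515", "Capital One Bank"), ("103100195", "ING Direct (Capital One 360)"),
   ("031100649", "Discover Bank"), ("011103093", "American Express Bank")]

-- the dict appended for one match; f"{r[:3]}-{r[3:6]}-{r[6:]}" ported as "-".join of the three slices (exact: literal '-' separators)
def mkSuggestion (routing bank : String) : List (String × String) :=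
  [("routing_number", routing), ("bank_name", bank),
   ("formatted_routing",
     PySem.Str.join "-" [PySem.Str.slice routing none (some 3),
                         PySem.Str.slice routing (some 3) (some 6),
                         PySem.Str.slice routing (some 6) none])]

-- sort key x["bank_name"]: first-match lookup; the key is always present in the dicts built above, so getD "" is exact
def pvBankKey (x : List (String × String)) : String := (x.lookup "bank_name").getD ""

def get_bank_suggestions (partial_routing : String) : List (List (String × String)) :=
  if partial_routing.toList = [] ∨ PySem.Str.len partial_routing < 3 then []
  else
    let suggestions := pvDB.foldl (fun acc rb =>
      if PySem.Str.startswith rb.1 partial_routing then acc ++ [mkSuggestion rb.1 rb.2] else acc) []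
    PySem.List.slice (PySem.List.sorted suggestions pvBankKey) none (some 10)

-- ===== PORT B =====

-- ROUTINGS_BY_BANK: B's static index, bank names sorted, routings in database insertion order
def pvByBank : List (String × List String) :=
  [("Ally Bank", ["031176110"]),
   ("American Express Bank", ["011103093"]),
   ("Bank of America", ["111000025", "026009593", "053000196", "054001204"]),
   ("Bank of the West", ["101000019"]),
   ("Capital One Bank", ["124303120", "051405515"]),
   ("Chase Bank", ["021000021", "021000322", "022000020"]),
   ("Citizens Bank", ["054000030"]),
   ("Discover Bank", ["031100649"]),
   ("Huntington National Bank", ["321270742", "044000024"]),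
   ("ING Direct (Capital One 360)", ["103100195"]),
   ("JPMorgan Chase Bank", ["063100277", "267084131", "021200025"]),
   ("KeyBank", ["065400137", "041001039"]),
   ("Navy Federal Credit Union", ["307070115", "256074974"]),
   ("PNC Bank", ["114000093", "043000096"]),
   ("Pentagon Federal Credit Union", ["314074269", "253177832"]),
   ("Publix Employees Federal Credit Union (PEFCU)", ["263179817"]),
   ("Regions Bank", ["322271627", "062000019"]),
   ("TD Bank", ["211274450", "031201360", "031100209"]),
   ("USAA Federal Savings Bank", ["211391825"]),
   ("Wells Fargo Bank", ["125000024", "121000248", "121042882", "122105278"])]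

-- _suggestion: r[:3] + "-" + r[3:6] + "-" + r[6:] ported by hand on the char-list side
-- (Python string '+' is concatenation; exact via PySem.Chars.slice and List append)
def pvSuggestion (routing bank : String) : List (String × String) :=
  [("routing_number", routing), ("bank_name", bank),
   ("formatted_routing",
     String.ofList (PySem.Chars.slice routing.toList none (some 3) ++
                '-' :: PySem.Chars.slice routing.toList (some 3) (some 6) ++
                '-' :: PySem.Chars.slice routing.toList (some 6) none))]

-- inner 'for routing in routings' loop with remaining budget k (Python's early return at
-- len(out)==10 ≡ stop once the budget is exhausted); returns (collected, budget left)
def pvScan (p bank : String) : Nat → List String → List (List (String × String)) × Nat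
  | k, [] => ([], k)
  | 0, _ :: _ => ([], 0)
  | Nat.succ j, r :: rs =>
      if PySem.Str.startswith r p then
        let res := pvScan p bank j rs
        (pvSuggestion r bank :: res.1, res.2)
      else pvScan p bank (Nat.succ j) rs

-- outer 'for bank, routings in ROUTINGS_BY_BANK' loop threading the budget
def pvCollect (p : String) : Nat → List (String × List String) → List (List (String × String))
  | _, [] => []
  | k, g :: gs =>
      let res := pvScan p g.1 k g.2
      res.1 ++ pvCollect p res.2 gs

def get_bank_suggestions_alt (partial_routing : String) : List (List (String × String)) :=
  if PySem.Str.len partial_routing < 3 then []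
  else pvCollect partial_routing 10 pvByBank

-- ===== PRECONDITION & SPEC =====
def Spec_get_bank_suggestions (partial_routing : String) (out : List (List (String × String))) : Prop := out = get_bank_suggestions_alt partial_routing
instance (partial_routing : String) (out : List (List (String × String))) : Decidable (Spec_get_bank_suggestions partial_routing out) := by unfold Spec_get_bank_suggestions; infer_instance

-- ===== CLAIM (what is proved, stated in full; the proofs are below) =====
def Claim_equal_get_bank_suggestions : Prop := ∀ (partial_routing : String), Dom_get_bank_suggestions partial_routing → Spec_get_bank_suggestions partial_routing (get_bank_suggestions partial_routing)

-- ===== LEMMAS AND PROOFS =====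

-- the grouped index flattened back to (routing, bank) pairs
def pvPairs (gs : List (String × List String)) : List (String × String) :=
  gs.flatMap (fun g => g.2.map (fun r => (r, g.1)))

-- the sort only looks at decide(key a < key b): equal comparison functions, equal sorts
theorem pv_sorted_key_congr {α κ κ' : Type} [LT κ] [DecidableLT κ] [LT κ'] [DecidableLT κ']
    (key : α → κ) (key' : α → κ')
    (h : ∀ a b, decide (key a < key b) = decide (key' a < key' b)) (xs : List α) :
    PySem.List.sorted xs key = PySem.List.sorted xs key' := by
  rw [PySem.List.sorted_eq_foldl_insertBy, PySem.List.sorted_eq_foldl_insertBy]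
  congr 1
  funext acc x
  congr 1
  funext a b
  exact h a b

-- pvByBank is exactly the database stably sorted by bank name
set_option maxHeartbeats 1000000 in
theorem pv_db_sorted :
    PySem.List.sorted pvDB (fun kv => kv.2.toList) = pvPairs pvByBank := by decide

-- insertBy puts x first when it sorts before every element
theorem pv_insertBy_cons_of_forall {α : Type} (before : α → α → Bool) (x : α) :
    ∀ (ys : List α), (∀ y ∈ ys, before x y = true) →
      PySem.List.insertBy before x ys = x :: ys := by
  intro ys h
  cases ys with
  | nil => rfl
  | cons y ys => simp [PySem.List.insertBy, h y (by simp)]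

theorem pv_filter_insertBy_neg {α : Type} (before : α → α → Bool) (q : α → Bool) (x : α)
    (hx : q x = false) :
    ∀ (ys : List α), (PySem.List.insertBy before x ys).filter q = ys.filter q := by
  intro ys
  induction ys with
  | nil => simp [PySem.List.insertBy, hx]
  | cons y ys ih =>
      by_cases hb : before x y = true
      · simp [PySem.List.insertBy, hb, hx]
      · simp only [PySem.List.insertBy, if_neg hb, List.filter_cons, ih]

theorem pv_filter_insertBy_pos {α κ : Type} [LinearOrder κ] (key : α → κ) (q : α → Bool)
    (x : α) (hx : q x = true) :
    ∀ (ys : List α), ys.Pairwise (fun a b => key a ≤ key b) →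
      (PySem.List.insertBy (fun a b => decide (key a < key b)) x ys).filter q
        = PySem.List.insertBy (fun a b => decide (key a < key b)) x (ys.filter q) := by
  intro ys
  induction ys with
  | nil => simp [PySem.List.insertBy, hx]
  | cons y ys ih =>
      intro hp
      rw [List.pairwise_cons] at hp
      obtain ⟨hy, hp'⟩ := hp
      by_cases hb : key x < key y
      · have hlt : ∀ z ∈ (y :: ys).filter q, decide (key x < key z) = true := by
          intro z hz
          have hz' : z ∈ y :: ys := List.mem_of_mem_filter hz
          rcases List.mem_cons.mp hz' with rfl | hz''
          · simpa using hb
          · simpa using lt_of_lt_of_le hb (hy z hz'')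
        rw [pv_insertBy_cons_of_forall _ x ((y :: ys).filter q) hlt]
        simp [PySem.List.insertBy, hb, List.filter_cons, hx]
      · simp only [PySem.List.insertBy, decide_eq_true_eq, if_neg hb, List.filter_cons]
        by_cases hq : q y = true
        · simp only [hq, if_pos]
          rw [ih hp']
          simp [PySem.List.insertBy, hb]
        · simp only [hq]
          simpa using ih hp'

theorem pv_sorted_append_singleton {α κ : Type} [LT κ] [DecidableLT κ]
    (xs : List α) (x : α) (key : α → κ) :
    PySem.List.sorted (xs ++ [x]) key
      = PySem.List.insertBy (fun a b => decide (key a < key b)) x (PySem.List.sorted xs key) := by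
  rw [PySem.List.sorted_eq_foldl_insertBy, PySem.List.sorted_eq_foldl_insertBy,
      List.foldl_append]
  rfl

-- filtering commutes with the stable sort
theorem pv_filter_sorted {α κ : Type} [LinearOrder κ] (key : α → κ) (q : α → Bool)
    (xs : List α) :
    (PySem.List.sorted xs key).filter q = PySem.List.sorted (xs.filter q) key := by
  induction xs using List.reverseRecOn with
  | nil => rfl
  | append_singleton xs x ih =>
      rw [pv_sorted_append_singleton, List.filter_append]
      by_cases hx : q x = true
      · rw [pv_filter_insertBy_pos key q x hx _ (PySem.List.sorted_pairwise xs key), ih]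
        simp only [List.filter_cons, hx, if_pos, List.filter_nil]
        rw [pv_sorted_append_singleton]
      · rw [pv_filter_insertBy_neg _ q x (by simpa using hx), ih]
        simp [hx]

theorem pv_map_insertBy {α β : Type} (f : α → β) (bA : α → α → Bool) (bB : β → β → Bool)
    (h : ∀ a b, bB (f a) (f b) = bA a b) (x : α) :
    ∀ (ys : List α),
      PySem.List.insertBy bB (f x) (ys.map f) = (PySem.List.insertBy bA x ys).map f := by
  intro ys
  induction ys with
  | nil => rfl
  | cons y ys ih =>
      by_cases hb : bA x y = true
      · simp [PySem.List.insertBy, h, hb]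
      · simp only [List.map_cons, PySem.List.insertBy, h,
          if_neg hb, List.map_cons]
        rw [ih]

-- mapping commutes with the stable sort when the keys agree through the map
theorem pv_sorted_map {α β κ : Type} [LinearOrder κ] (f : α → β)
    (keyA : α → κ) (keyB : β → κ) (h : ∀ a, keyB (f a) = keyA a) (xs : List α) :
    PySem.List.sorted (xs.map f) keyB = (PySem.List.sorted xs keyA).map f := by
  induction xs using List.reverseRecOn with
  | nil => rfl
  | append_singleton xs x ih =>
      rw [List.map_append, List.map_singleton, pv_sorted_append_singleton,
          pv_sorted_append_singleton, ih,
          pv_map_insertBy f (fun a b => decide (keyA a < keyA b))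
            (fun a b => decide (keyB a < keyB b)) (fun a b => by simp [h])]

theorem pv_key_mk (r b : String) : pvBankKey (mkSuggestion r b) = b := by
  simp [pvBankKey, mkSuggestion, List.lookup]

-- the inner loop collects the first k matches of the group
theorem pv_scan_spec (p bank : String) :
    ∀ (rs : List String) (k : Nat),
      pvScan p bank k rs
        = (((rs.filter (fun r => PySem.Str.startswith r p)).map
              (fun r => pvSuggestion r bank)).take k,
           k - (rs.filter (fun r => PySem.Str.startswith r p)).length) := by
  intro rs
  induction rs with
  | nil => intro k; simp [pvScan]
  | cons r rs ih =>
      intro k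
      cases k with
      | zero => simp [pvScan, List.filter_cons]
      | succ j =>
          by_cases hq : PySem.Chars.startswith r.toList p.toList = true
          · simp [pvScan, hq, ih, Nat.succ_sub_succ]
          · simp only [Bool.not_eq_true] at hq
            simp [pvScan, hq, ih (j + 1)]

-- the outer loop is take k of the flattened filtered index
theorem pv_collect_spec (p : String) :
    ∀ (gs : List (String × List String)) (k : Nat),
      pvCollect p k gs
        = (gs.flatMap (fun g => (g.2.filter (fun r => PySem.Str.startswith r p)).map
            (fun r => pvSuggestion r g.1))).take k := by
  intro gs
  induction gs with
  | nil => intro k; simp [pvCollect]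
  | cons g gs ih =>
      intro k
      simp only [pvCollect, pv_scan_spec, ih, List.flatMap_cons, List.take_append,
        List.length_map]

-- filter+map over the flattened pairs, groupwise
theorem pv_pairs_filter_map (p : String) :
    ∀ (gs : List (String × List String)),
      ((pvPairs gs).filter (fun rb => PySem.Str.startswith rb.1 p)).map
          (fun rb => mkSuggestion rb.1 rb.2)
        = gs.flatMap (fun g => (g.2.filter (fun r => PySem.Str.startswith r p)).map
            (fun r => mkSuggestion r g.1)) := by
  intro gs
  induction gs with
  | nil => rfl
  | cons g gs ih =>
      simp only [pvPairs, List.flatMap_cons, List.filter_append, List.map_append,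
        List.filter_map, List.map_map, Function.comp_def] at *
      rw [ih]

-- on every routing of the database index the two suggestion builders agree
theorem pv_suggestion_eq :
    ∀ g ∈ pvByBank, ∀ r ∈ g.2, mkSuggestion r g.1 = pvSuggestion r g.1 := by decide

theorem pv_flatMap_suggestion (p : String) :
    pvByBank.flatMap (fun g => (g.2.filter (fun r => PySem.Str.startswith r p)).map
        (fun r => mkSuggestion r g.1))
      = pvByBank.flatMap (fun g => (g.2.filter (fun r => PySem.Str.startswith r p)).map
        (fun r => pvSuggestion r g.1)) := by
  apply List.flatMap_congr
  intro g hg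
  apply List.map_congr_left
  intro r hr
  exact pv_suggestion_eq g hg r (List.mem_of_mem_filter hr)

-- ===== VERDICT (by name: the statement is the Claim_ definition above) =====
theorem get_bank_suggestions_spec : Claim_equal_get_bank_suggestions := by
  intro partial_routing _
  unfold Spec_get_bank_suggestions get_bank_suggestions get_bank_suggestions_alt
  by_cases h3 : PySem.Str.len partial_routing < 3
  · rw [if_pos (Or.inr h3), if_pos h3]
  · have hg : ¬ (partial_routing.toList = [] ∨ PySem.Str.len partial_routing < 3) := by
      rintro (he | hl)
      · exact h3 (by simp [PySem.Str.len_eq, he])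
      · exact h3 hl
    simp only [if_neg hg, if_neg h3]
    rw [PySem.List.foldl_append_if
          (fun rb => PySem.Str.startswith rb.1 partial_routing)
          (fun rb => mkSuggestion rb.1 rb.2) pvDB []]
    simp only [List.nil_append]
    rw [pv_sorted_map (fun rb : String × String => mkSuggestion rb.1 rb.2)
          (fun kv : String × String => kv.2) pvBankKey (fun a => pv_key_mk a.1 a.2),
        ← pv_filter_sorted,
        pv_sorted_key_congr (fun kv : String × String => kv.2)
          (fun kv : String × String => kv.2.toList)
          (fun a b => by rw [decide_eq_decide]; exact String.lt_iff_toList_lt),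
        pv_db_sorted, pv_pairs_filter_map, pv_flatMap_suggestion, pv_collect_spec]
    simp [PySem.List.slice_to]
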